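-- pv_equiv track=rewrite | github.com/Wissam-El-Labban/Data-Encryption-Standard | Encrypt.py | text_to_64bit_blocks
-- ===== SOURCE A (Python) =====
-- def text_to_64bit_blocks(plaintext):
--     '''convert plaintext to 64-bit blocks'''
--     def text_to_binary(text):
--         '''convert plaintext to binary string'''
--         binary_string = ''.join(format(ord(char), '08b') for char in text)
--         return binary_string
--     def pad_binary_string(binary_string, text):
--         '''convert plaintext to 64-bit blocks with PKCS7 padding'''
--         #recieveing the amount of bytes (8 bit chunks) that need to be padded
--         padding_length = 8 - (len(text) % 8)
--         if padding_length != 64: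
--             padding_byte = format(padding_length, '08b') * (padding_length)
--             binary_string = binary_string + padding_byte
--         return binary_string
--     def split_into_blocks(binary_string):
--         '''split binary string into 64-bit blocks'''
--         blocks = [binary_string[i:i + 64] for i in range(0, len(binary_string), 64)]
--
--         return blocks
--
--     binary_string = text_to_binary(plaintext)
--     padded_binary_string = pad_binary_string(binary_string, plaintext)
--     blocks = split_into_blocks(padded_binary_string)
--     return blocks
-- ===== SOURCE B (Python) =====
-- def text_to_64bit_blocks(plaintext):
--     '''convert plaintext to PKCS7-padded 64-bit blocks'''
--     pad = 8 - len(plaintext) % 8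
--     vals = [ord(c) for c in plaintext] + [pad] * pad
--     blocks = []
--     i = 0
--     while i < len(vals):
--         blocks.append(''.join(format(b, '08b') for b in vals[i:i+8]))
--         i += 8
--     return blocks
-- ===== Notes on version B (the rewrite author's own statement) =====
-- stated objective: simpler
-- what changed: B builds the padded byte-value list first and renders it eight bytes at a time, emitting one block per group with a single index-advancing loop, instead of A's three passes that render one long bit-string, append a padding bit-string, and slice it at 64-bit offsets.
import Mathlib
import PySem

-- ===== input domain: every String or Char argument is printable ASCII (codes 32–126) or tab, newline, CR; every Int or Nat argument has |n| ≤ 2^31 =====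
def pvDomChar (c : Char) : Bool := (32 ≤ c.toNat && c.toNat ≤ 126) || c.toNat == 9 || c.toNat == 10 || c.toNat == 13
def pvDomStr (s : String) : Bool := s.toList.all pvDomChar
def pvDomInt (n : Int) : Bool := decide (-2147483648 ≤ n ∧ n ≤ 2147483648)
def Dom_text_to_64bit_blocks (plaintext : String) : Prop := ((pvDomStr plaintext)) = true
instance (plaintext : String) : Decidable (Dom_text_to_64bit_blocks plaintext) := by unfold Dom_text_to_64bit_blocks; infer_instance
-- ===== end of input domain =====

-- B builds the padded byte-value list first and consumes it eight bytes at a time, rendering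
-- each group directly into one block, instead of A's render-all / pad / slice-at-64 pipeline
-- (objective: simpler, same cost).

-- shared helper: Python's format(n, 'b') for n ≥ 0, as a list of binary digit characters (exact for Nat)
def pvBinDigits : Nat → List Char
  | 0 => ['0']
  | 1 => ['1']
  | n + 2 => pvBinDigits ((n + 2) / 2) ++ [if (n + 2) % 2 = 1 then '1' else '0']

-- shared helper: Python's format(n, '08b') for n ≥ 0 (zero-pad on the left to width 8)
def pvFormat08b (n : Nat) : List Char :=
  let d := pvBinDigits n
  List.replicate (8 - d.length) '0' ++ d

-- ===== PORT A =====
def pvTextToBinary (text : String) : List Char :=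
  (text.toList.map (fun c => pvFormat08b c.toNat)).flatten

def pvPadBinaryString (binaryString : List Char) (text : String) : List Char :=
  let paddingLength : Nat := 8 - (text.toList.length % 8)
  if paddingLength ≠ 64 then
    binaryString ++ (List.replicate paddingLength (pvFormat08b paddingLength)).flatten
  else binaryString

def pvSplitIntoBlocks (binaryString : List Char) : List String :=
  (PySem.List.pyRange 0 (binaryString.length) 64).map
    (fun i => String.ofList (PySem.List.slice binaryString (some i) (some (i + 64))))

def text_to_64bit_blocks (plaintext : String) : List String :=
  pvSplitIntoBlocks (pvPadBinaryString (pvTextToBinary plaintext) plaintext)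

-- ===== PORT B =====
def pvRenderBlock (g : List Nat) : String :=
  String.ofList ((g.map pvFormat08b).flatten)

def pvChunkLoop (vals : List Nat) (i : Nat) (blocks : List String) : List String :=
  if _h : i < vals.length then
    pvChunkLoop vals (i + 8)
      (blocks ++ [pvRenderBlock (PySem.List.slice vals (some (i : Int)) (some ((i : Int) + 8)))])
  else blocks
termination_by vals.length - i

def text_to_64bit_blocks_alt (plaintext : String) : List String :=
  let pad : Nat := 8 - plaintext.toList.length % 8
  let vals := plaintext.toList.map Char.toNat ++ List.replicate pad pad
  pvChunkLoop vals 0 []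

-- ===== PRECONDITION & SPEC =====
def Spec_text_to_64bit_blocks (plaintext : String) (out : List String) : Prop := out = text_to_64bit_blocks_alt plaintext
instance (plaintext : String) (out : List String) : Decidable (Spec_text_to_64bit_blocks plaintext out) := by unfold Spec_text_to_64bit_blocks; infer_instance

-- ===== CLAIM (what is proved, stated in full; the proofs are below) =====
def Claim_equal_text_to_64bit_blocks : Prop := ∀ (plaintext : String), Dom_text_to_64bit_blocks plaintext → Spec_text_to_64bit_blocks plaintext (text_to_64bit_blocks plaintext)

-- ===== LEMMAS AND PROOFS =====

theorem pvBinDigits_len_le : ∀ (k n : Nat), 1 ≤ k → n < 2 ^ k → (pvBinDigits n).length ≤ k := by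
  intro k
  induction k with
  | zero => omega
  | succ k ih =>
    intro n _ hn
    match n with
    | 0 => simp [pvBinDigits]
    | 1 => simp [pvBinDigits]
    | m + 2 =>
      have hk : 1 ≤ k := by
        by_contra h
        have hk0 : k = 0 := by omega
        rw [hk0] at hn
        norm_num at hn
        omega
      have hp : 2 ^ (k + 1) = 2 ^ k * 2 := Nat.pow_succ 2 k
      have hd : (m + 2) / 2 < 2 ^ k := by omega
      have hih := ih ((m + 2) / 2) hk hd
      simp only [pvBinDigits, List.length_append, List.length_cons, List.length_nil]
      omega

theorem pvFormat08b_len (n : Nat) (h : n < 256) : (pvFormat08b n).length = 8 := by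
  have := pvBinDigits_len_le 8 n (by omega) (by norm_num; omega)
  simp [pvFormat08b]
  omega

def pvChunks64 : List Char → List String
  | [] => []
  | c :: cs => String.ofList ((c :: cs).take 64) :: pvChunks64 ((c :: cs).drop 64)
termination_by l => l.length
decreasing_by simp

theorem pyRange64_cons (L : Nat) (h : 0 < L) :
    PySem.List.pyRange 0 (L : Int) 64 = 0 :: (PySem.List.pyRange 0 ((L - 64 : Nat) : Int) 64).map (· + 64) := by
  rw [PySem.List.pyRange_of_pos _ _ (by norm_num), PySem.List.pyRange_of_pos _ _ (by norm_num)]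
  have h1 : (if (0:Int) < (L:Int) then (((L:Int) - 0 + 64 - 1) / 64).toNat else 0)
      = (if (0:Int) < ((L - 64 : Nat) : Int) then ((((L - 64 : Nat) : Int) - 0 + 64 - 1) / 64).toNat else 0) + 1 := by
    split_ifs <;> push_cast <;> omega
  rw [h1, List.range_succ_eq_map]
  simp only [List.map_cons, List.map_map]
  refine List.cons_eq_cons.mpr ⟨by norm_num, List.map_congr_left fun k _ => ?_⟩
  simp
  ring

theorem slice_shift64 (l : List Char) (i : Int) (hi : 0 ≤ i) :
    PySem.List.slice l (some (i + 64)) (some (i + 64 + 64)) =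
      PySem.List.slice (l.drop 64) (some i) (some (i + 64)) := by
  rw [PySem.List.slice_toNat _ (by omega) (by omega),
      PySem.List.slice_toNat _ hi (by omega), List.drop_drop]
  have h1 : (i + 64 + 64).toNat - (i + 64).toNat = (i + 64).toNat - i.toNat := by omega
  have h2 : (i + 64).toNat = 64 + i.toNat := by omega
  rw [h1, h2]

theorem split_eq_chunks (l : List Char) : pvSplitIntoBlocks l = pvChunks64 l := by
  induction l using pvChunks64.induct with
  | case1 => simp [pvSplitIntoBlocks, pvChunks64, PySem.List.pyRange]
  | case2 c cs ih =>
    rw [pvChunks64]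
    unfold pvSplitIntoBlocks
    rw [show ((c :: cs).length : Int) = ((c :: cs).length : Nat) from rfl,
        pyRange64_cons _ (by simp)]
    rw [List.map_cons, List.map_map]
    congr 1
    · rw [PySem.List.slice_zero_start, PySem.List.slice_to _ (by norm_num : (0:Int) ≤ 0 + 64)]
      rw [show ((0:Int) + 64).toNat = 64 from rfl]
    · rw [← ih]
      unfold pvSplitIntoBlocks
      rw [show (((c :: cs).drop 64).length : Int) = (((c :: cs).length - 64 : Nat) : Int) by simp]
      apply List.map_congr_left
      intro i himem
      have h0 : (0:Int) < 64 := by norm_num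
      have := (PySem.List.mem_pyRange_iff_of_pos h0 i).mp himem
      simp only [Function.comp]
      rw [slice_shift64 (c :: cs) i this.1]

theorem flatten_take_drop8 : ∀ (n : Nat) (L : List (List Char)), (∀ x ∈ L, x.length = 8) →
    L.flatten.take (8 * n) = (L.take n).flatten ∧ L.flatten.drop (8 * n) = (L.drop n).flatten := by
  intro n
  induction n with
  | zero => simp
  | succ n ih =>
    intro L hL
    cases L with
    | nil => simp
    | cons x xs =>
      have hx : x.length = 8 := hL x (by simp)
      have hrec := ih xs (fun y hy => hL y (List.mem_cons_of_mem _ hy))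
      constructor
      · rw [show 8 * (n + 1) = 8 + 8 * n by ring]
        simp only [List.flatten_cons, List.take_succ_cons, List.take_append, hx]
        rw [List.take_of_length_le (by omega), show 8 + 8 * n - 8 = 8 * n by omega, hrec.1]
      · rw [show 8 * (n + 1) = 8 + 8 * n by ring]
        simp only [List.flatten_cons, List.drop_succ_cons, List.drop_append, hx]
        rw [List.drop_of_length_le (by omega), show 8 + 8 * n - 8 = 8 * n by omega, hrec.2]
        simp

def pvChunkBlocks : List Nat → List String
  | [] => []
  | v :: vs => pvRenderBlock ((v :: vs).take 8) :: pvChunkBlocks ((v :: vs).drop 8)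
termination_by vs => vs.length
decreasing_by simp

theorem chunks_flatten (bs : List Nat) (h : ∀ b ∈ bs, b < 256) :
    pvChunks64 ((bs.map pvFormat08b).flatten) = pvChunkBlocks bs := by
  induction bs using pvChunkBlocks.induct with
  | case1 => simp [pvChunks64, pvChunkBlocks]
  | case2 v vs ih =>
    have hlen : ∀ x ∈ (v :: vs).map pvFormat08b, x.length = 8 := by
      intro x hx
      obtain ⟨b, hb, rfl⟩ := List.mem_map.mp hx
      exact pvFormat08b_len b (h b hb)
    have htd := flatten_take_drop8 8 ((v :: vs).map pvFormat08b) hlen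
    have hne : ((v :: vs).map pvFormat08b).flatten ≠ [] := by
      simp only [List.map_cons, List.flatten_cons]
      intro hcon
      have := congrArg List.length hcon
      simp [pvFormat08b_len v (h v (by simp))] at this
    rw [pvChunkBlocks]
    obtain ⟨c, cs, hccs⟩ := List.exists_cons_of_ne_nil hne
    rw [hccs, pvChunks64, ← hccs]
    have h64 : (64 : Nat) = 8 * 8 := by norm_num
    congr 1
    · rw [h64, htd.1, ← List.map_take]
      rfl
    · rw [h64, htd.2, ← List.map_drop]
      exact ih (fun b hb => h b (List.mem_of_mem_drop hb))

theorem chunkLoop_eq (vals : List Nat) : ∀ (i : Nat) (blocks : List String),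
    pvChunkLoop vals i blocks = blocks ++ pvChunkBlocks (vals.drop i) := by
  intro i blocks
  induction i, blocks using pvChunkLoop.induct vals with
  | case1 i blocks h ih =>
    rw [pvChunkLoop, dif_pos h, ih]
    have hne : vals.drop i ≠ [] := by
      intro hc
      have := congrArg List.length hc
      simp at this
      omega
    obtain ⟨v, vs, hvvs⟩ := List.exists_cons_of_ne_nil hne
    rw [hvvs, pvChunkBlocks, ← hvvs]
    rw [show ((i : Int) + 8) = ((i + 8 : Nat) : Int) by push_cast; ring]
    rw [PySem.List.slice_natCast]
    rw [show i + 8 - i = 8 by omega]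
    rw [List.drop_drop]
    simp
  | case2 i blocks h =>
    rw [pvChunkLoop, dif_neg h]
    have hnil : vals.drop i = [] := by
      rw [List.drop_eq_nil_iff]
      omega
    rw [hnil, pvChunkBlocks]
    exact (List.append_nil blocks).symm

theorem pv_final (p : String) (hd : (p.toList.all pvDomChar) = true) :
    pvSplitIntoBlocks (pvPadBinaryString (pvTextToBinary p) p) =
      pvChunkBlocks (p.toList.map Char.toNat ++ List.replicate (8 - p.toList.length % 8) (8 - p.toList.length % 8)) := by
  set pad := 8 - p.toList.length % 8 with hpad
  have hpadlt : pad ≤ 8 := by omega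
  have hneq : pad ≠ 64 := by omega
  have hform : pvPadBinaryString (pvTextToBinary p) p =
      ((p.toList.map Char.toNat ++ List.replicate pad pad).map pvFormat08b).flatten := by
    rw [pvPadBinaryString, pvTextToBinary]
    simp only [← hpad, if_pos hneq, List.map_append, List.map_map, List.map_replicate,
      List.flatten_append]
    rfl
  rw [hform, split_eq_chunks, chunks_flatten]
  intro b hb
  rcases List.mem_append.mp hb with hb | hb
  · obtain ⟨c, hc, rfl⟩ := List.mem_map.mp hb
    have := List.all_eq_true.mp hd c hc
    simp only [pvDomChar, Bool.or_eq_true, Bool.and_eq_true, decide_eq_true_eq, beq_iff_eq] at this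
    omega
  · have := List.eq_of_mem_replicate hb
    omega

-- ===== VERDICT (by name: the statement is the Claim_ definition above) =====
theorem text_to_64bit_blocks_spec : Claim_equal_text_to_64bit_blocks := by
  intro p hd
  unfold Spec_text_to_64bit_blocks text_to_64bit_blocks text_to_64bit_blocks_alt
  rw [chunkLoop_eq, List.drop_zero, List.nil_append]
  exact pv_final p hd
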